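-- pv_equiv track=rewrite | github.com/Lipcu-pku/adofaihelper | __init__.py | clearFormat
-- ===== SOURCE A (Python) =====
-- def clearFormat(content: str) -> str:
--     """
--     To clear the format of some `<str>` content.
--
--     ---
--     e.g. <size=50> Size </size> -> Size
--
--     ---
--     Parameters:
--         `content`: `<str>` content to clear format.
--
--     ---
--     Returns:
--         converted '<str>'
--     """
--     cleared = ''
--     to_pass, to_add = False, True
--     for b in content:
--         if b == '<':
--             to_pass, to_add = True, False
--         if b == '>':
--             to_pass, to_add = True, True
--         if to_add:
--             if to_pass:
--                 to_pass = False
--                 continue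
--             cleared += b
--     return cleared
-- ===== SOURCE B (Python) =====
-- def clearFormat(content: str) -> str:
--     parts = content.split('<')
--     cleared = parts[0].replace('>', '')
--     for part in parts[1:]:
--         i = part.find('>')
--         if i != -1:
--             cleared += part[i+1:].replace('>', '')
--     return cleared
-- ===== Notes on version B (the rewrite author's own statement) =====
-- stated objective: alternative
-- what changed: Replaces the per-character flag-machine loop with a decomposition based on str.split at the tag-opening bracket: each segment after an opener discards everything up to and including its first closing bracket (or the whole segment if the tag is unterminated), and stray closing brackets are deleted from the outside segments with str.replace.
import Mathlib
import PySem

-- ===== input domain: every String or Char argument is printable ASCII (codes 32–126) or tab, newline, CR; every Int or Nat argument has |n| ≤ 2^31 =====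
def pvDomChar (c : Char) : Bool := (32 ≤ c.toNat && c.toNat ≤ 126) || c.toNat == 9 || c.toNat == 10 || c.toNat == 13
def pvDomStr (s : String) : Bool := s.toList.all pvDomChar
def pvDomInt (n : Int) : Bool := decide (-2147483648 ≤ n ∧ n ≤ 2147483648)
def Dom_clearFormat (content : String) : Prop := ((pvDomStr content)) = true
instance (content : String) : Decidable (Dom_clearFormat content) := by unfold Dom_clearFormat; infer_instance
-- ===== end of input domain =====

-- B replaces A's per-character flag machine by a decomposition that splits at the tag-opening bracket (alternative, same O(n)).

-- ===== PORT A =====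
-- one step of A's loop body, state = (cleared, to_pass, to_add)
def clearFormatStep (st : List Char × Bool × Bool) (b : Char) : List Char × Bool × Bool :=
  let cleared := st.1
  let to_pass := st.2.1
  let to_add := st.2.2
  let (to_pass, to_add) := if b = '<' then (true, false) else (to_pass, to_add)
  let (to_pass, to_add) := if b = '>' then (true, true) else (to_pass, to_add)
  if to_add then
    if to_pass then (cleared, false, to_add)   -- `continue`
    else (cleared ++ [b], to_pass, to_add)
  else (cleared, to_pass, to_add)

def clearFormat (content : String) : String :=
  String.mk (content.toList.foldl clearFormatStep ([], false, true)).1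

-- ===== PORT B =====
-- per-part body of B's for-loop
def clearFormatAltStep (cl : List Char) (part : List Char) : List Char :=
  let i := PySem.Chars.find part ['>']
  if i ≠ -1 then cl ++ PySem.Chars.replace (PySem.Chars.slice part (some (i + 1)) none) ['>'] []
  else cl

def clearFormat_alt (content : String) : String :=
  let parts := PySem.Chars.splitOn content.toList ['<']
  let cleared := PySem.Chars.replace (parts.headD []) ['>'] []
  String.mk (parts.tail.foldl clearFormatAltStep cleared)

-- ===== PRECONDITION & SPEC =====
def Spec_clearFormat (content : String) (out : String) : Prop := out = clearFormat_alt content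
instance (content : String) (out : String) : Decidable (Spec_clearFormat content out) := by unfold Spec_clearFormat; infer_instance

-- ===== CLAIM (what is proved, stated in full; the proofs are below) =====
def Claim_equal_clearFormat : Prop := ∀ (content : String), Dom_clearFormat content → Spec_clearFormat content (clearFormat content)

-- ===== LEMMAS AND PROOFS =====

-- the two modes of A's machine, as structural recursion: outside a tag / inside a tag
mutual
def stripOut : List Char → List Char
  | [] => []
  | c :: r => if c = '<' then stripIn r else if c = '>' then stripOut r else c :: stripOut r
def stripIn : List Char → List Char
  | [] => []
  | c :: r => if c = '>' then stripOut r else stripIn r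
end

-- drop every '>'
def filtGt (cs : List Char) : List Char := cs.filter (fun c => !(c = '>'))

-- structural specification of str.split('<')
def splitSpec : List Char → List (List Char)
  | [] => [[]]
  | c :: r => if c = '<' then [] :: splitSpec r else (splitSpec r).modifyHead (c :: ·)

theorem splitSpec_ne_nil (cs : List Char) : splitSpec cs ≠ [] := by
  induction cs with
  | nil => simp [splitSpec]
  | cons c r ih =>
    simp only [splitSpec]
    split
    · simp
    · cases h : splitSpec r with
      | nil => exact absurd h ih
      | cons p t => simp [List.modifyHead]

-- A's foldl computes stripOut / stripIn according to the machine state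
theorem foldl_step_eq (cs : List Char) : (∀ acc,
    (cs.foldl clearFormatStep (acc, false, true)).1 = acc ++ stripOut cs) ∧ (∀ acc,
    (cs.foldl clearFormatStep (acc, true, false)).1 = acc ++ stripIn cs) := by
  induction cs with
  | nil => simp [stripOut, stripIn]
  | cons c r ih =>
    constructor <;> intro acc
    · by_cases h1 : c = '<'
      · simp [h1, clearFormatStep, stripOut, ih.2]
      · by_cases h2 : c = '>'
        · simp [h1, h2, clearFormatStep, stripOut, ih.1]
        · simp [h1, h2, clearFormatStep, stripOut, ih.1]
    · by_cases h1 : c = '<'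
      · simp [h1, clearFormatStep, stripIn, ih.2]
      · by_cases h2 : c = '>'
        · simp [h1, h2, clearFormatStep, stripIn, ih.1]
        · simp [h1, h2, clearFormatStep, stripIn, ih.2]

-- replace(s, '>', '') is the filter dropping '>'
theorem replaceGo_eq (cs : List Char) : ∀ (fuel : Nat) (acc : List Char), cs.length ≤ fuel →
    PySem.Chars.replace.go ['>'] [] fuel cs acc = acc.reverse ++ filtGt cs := by
  induction cs with
  | nil =>
    intro fuel acc _
    cases fuel <;> simp [PySem.Chars.replace.go, filtGt]
  | cons c r ih =>
    intro fuel acc hf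
    cases fuel with
    | zero => simp at hf
    | succ f =>
      rw [PySem.Chars.replace.go]
      by_cases h : c = '>'
      · subst h
        rw [if_pos (by simp [List.isPrefixOf])]
        simp only [List.length_cons, List.length_nil, List.drop_succ_cons, List.drop_zero]
        rw [ih f _ (by simpa using hf)]
        simp [filtGt]
      · rw [if_neg (by simp only [List.isPrefixOf, List.isPrefixOf_nil_left, Bool.and_true,
          beq_iff_eq]; exact fun h' => h h'.symm)]
        rw [ih f (c :: acc) (by simpa using hf)]
        simp [filtGt, h]

theorem replace_eq_filtGt (cs : List Char) : PySem.Chars.replace cs ['>'] [] = filtGt cs := by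
  rw [PySem.Chars.replace]
  simpa using replaceGo_eq cs cs.length [] le_rfl

-- splitOn '<' computes splitSpec
theorem splitOnGo_eq (cs : List Char) : ∀ (fuel : Nat) (cur : List Char) (acc : List (List Char)),
    cs.length < fuel →
    PySem.Chars.splitOn.go ['<'] fuel cs cur acc
      = acc.reverse ++ (splitSpec cs).modifyHead (cur.reverse ++ ·) := by
  induction cs with
  | nil =>
    intro fuel cur acc hf
    cases fuel with
    | zero => omega
    | succ f => simp [PySem.Chars.splitOn.go, splitSpec, List.modifyHead]
  | cons c r ih =>
    intro fuel cur acc hf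
    cases fuel with
    | zero => omega
    | succ f =>
      rw [PySem.Chars.splitOn.go]
      by_cases h : c = '<'
      · subst h
        rw [if_pos (by simp [List.isPrefixOf])]
        simp only [List.length_cons, List.length_nil, List.drop_succ_cons, List.drop_zero]
        rw [ih f [] (cur.reverse :: acc) (by simp at hf ⊢; omega)]
        simp only [splitSpec, if_pos rfl]
        cases hs : splitSpec r with
        | nil => exact absurd hs (splitSpec_ne_nil r)
        | cons p t => simp [List.modifyHead]
      · rw [if_neg (by simp only [List.isPrefixOf, List.isPrefixOf_nil_left, Bool.and_true,
          beq_iff_eq]; exact fun h' => h h'.symm)]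
        rw [ih f (c :: cur) acc (by simp at hf ⊢; omega)]
        simp only [splitSpec, if_neg h]
        cases hs : splitSpec r with
        | nil => exact absurd hs (splitSpec_ne_nil r)
        | cons p t => simp [List.modifyHead]

theorem splitOn_eq_splitSpec (cs : List Char) :
    PySem.Chars.splitOn cs ['<'] = splitSpec cs := by
  rw [PySem.Chars.splitOn, splitOnGo_eq cs (cs.length + 1) [] [] (by omega)]
  cases hs : splitSpec cs with
  | nil => exact absurd hs (splitSpec_ne_nil cs)
  | cons p t => simp [List.modifyHead]

-- every part produced by splitSpec is '<'-free
theorem splitSpec_no_lt (cs : List Char) : ∀ p ∈ splitSpec cs, '<' ∉ p := by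
  induction cs with
  | nil => simp [splitSpec]
  | cons c r ih =>
    simp only [splitSpec]
    split
    · intro p hp
      rcases List.mem_cons.mp hp with h | h
      · simp [h]
      · exact ih p h
    · rename_i hc
      cases hs : splitSpec r with
      | nil => exact absurd hs (splitSpec_ne_nil r)
      | cons q t =>
        intro p hp
        rcases List.mem_cons.mp (by simpa [List.modifyHead, hs] using hp) with h | h
        · subst h
          intro hm
          rcases List.mem_cons.mp hm with h' | h'
          · exact hc h'.symm
          · exact ih q (hs ▸ List.mem_cons_self ..) h'
        · exact ih p (hs ▸ List.mem_cons_of_mem _ h)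

-- find(part, '>') characterised
theorem findGo_gt (cs : List Char) : ∀ (k : Nat),
    PySem.Chars.find.go ['>'] cs k
      = (if '>' ∈ cs then ((k + cs.idxOf '>' : Nat) : Int) else -1) := by
  induction cs with
  | nil => intro k; simp [PySem.Chars.find.go]
  | cons c r ih =>
    intro k
    rw [PySem.Chars.find.go]
    by_cases h : c = '>'
    · subst h
      rw [if_pos (by simp [List.isPrefixOf])]
      simp [List.idxOf_cons]
    · rw [if_neg (by simp only [List.isPrefixOf, List.isPrefixOf_nil_left, Bool.and_true,
        beq_iff_eq]; exact fun h' => h h'.symm)]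
      rw [ih (k + 1)]
      have hb : (c == '>') = false := by simp [h]
      by_cases hm : '>' ∈ r
      · rw [if_pos hm, if_pos (List.mem_cons_of_mem _ hm)]
        simp only [List.idxOf_cons, hb, cond_false]
        push_cast
        ring
      · rw [if_neg hm, if_neg (by simp [hm, Ne.symm h])]

-- stripOut on a '<'-free list is filtGt
theorem stripOut_no_lt (cs : List Char) (h : '<' ∉ cs) : stripOut cs = filtGt cs := by
  induction cs with
  | nil => simp [stripOut, filtGt]
  | cons c r ih =>
    have hr : '<' ∉ r := fun hm => h (List.mem_cons_of_mem _ hm)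
    have hc : ¬ c = '<' := fun hh => h (by simp [hh])
    by_cases h2 : c = '>'
    · subst h2
      rw [show stripOut ('>' :: r) = stripOut r from by simp [stripOut], ih hr]
      simp [filtGt]
    · rw [show stripOut (c :: r) = c :: stripOut r from by simp [stripOut, hc, h2], ih hr]
      simp [filtGt, h2]

-- on a '<'-free part, stripIn drops through the first '>' and filters the rest
theorem stripIn_of_no_lt (part : List Char) (hlt : '<' ∉ part) :
    stripIn part = if '>' ∈ part then filtGt (part.drop (part.idxOf '>' + 1)) else [] := by
  induction part with
  | nil => simp [stripIn]
  | cons c r ih =>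
    have hr : '<' ∉ r := fun hm => hlt (List.mem_cons_of_mem _ hm)
    by_cases h : c = '>'
    · subst h
      rw [show stripIn ('>' :: r) = stripOut r from by simp [stripIn], stripOut_no_lt r hr,
        if_pos (by simp)]
      simp [List.idxOf_cons]
    · have hb : (c == '>') = false := by simp [h]
      rw [show stripIn (c :: r) = stripIn r from by simp [stripIn, h], ih hr]
      by_cases hm : '>' ∈ r
      · rw [if_pos hm, if_pos (List.mem_cons_of_mem _ hm)]
        simp [List.idxOf_cons, hb, List.drop_succ_cons]
      · rw [if_neg hm, if_neg (by simp [hm, Ne.symm h])]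

theorem altStep_eq (cl part : List Char) (hlt : '<' ∉ part) :
    clearFormatAltStep cl part = cl ++ stripIn part := by
  rw [clearFormatAltStep, stripIn_of_no_lt part hlt]
  simp only [PySem.Chars.find]
  rw [findGo_gt part 0]
  by_cases hm : '>' ∈ part
  · rw [if_pos hm, if_pos (show ((0 + part.idxOf '>' : Nat) : Int) ≠ -1 by omega)]
    have hcast : ((0 + part.idxOf '>' : Nat) : Int) + 1 = ((part.idxOf '>' + 1 : Nat) : Int) := by
      push_cast; ring
    rw [hcast, PySem.Chars.slice_eq_listSlice, PySem.List.slice_from_natCast,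
      replace_eq_filtGt, if_pos hm]
  · rw [if_neg hm, if_neg (by simp), if_neg hm]
    simp

-- the joint split/strip decomposition
theorem strip_split (cs : List Char) :
    (stripOut cs = stripOut ((splitSpec cs).headD []) ++ (((splitSpec cs).tail).map stripIn).flatten)
  ∧ (stripIn cs = stripIn ((splitSpec cs).headD []) ++ (((splitSpec cs).tail).map stripIn).flatten) := by
  induction cs with
  | nil => simp [splitSpec, stripOut, stripIn]
  | cons c r ih =>
    cases hs : splitSpec r with
    | nil => exact absurd hs (splitSpec_ne_nil r)
    | cons p t =>
      have ih1 := ih.1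
      have ih2 := ih.2
      rw [hs] at ih1 ih2
      simp only [List.headD, List.tail] at ih1 ih2
      by_cases h1 : c = '<'
      · have hsp : splitSpec (c :: r) = [] :: p :: t := by
          rw [show splitSpec (c :: r) = [] :: splitSpec r from by simp [splitSpec, h1], hs]
        rw [hsp]
        simp only [List.headD, List.tail, List.map_cons, List.flatten_cons]
        subst h1
        constructor
        · rw [show stripOut ('<' :: r) = stripIn r from by simp [stripOut]]
          simpa [stripOut] using ih2
        · rw [show stripIn ('<' :: r) = stripIn r from by simp [stripIn]]
          simpa [stripIn] using ih2
      · have hsp : splitSpec (c :: r) = (c :: p) :: t := by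
          rw [show splitSpec (c :: r) = (splitSpec r).modifyHead (c :: ·) from by
            simp [splitSpec, h1], hs]
          rfl
        rw [hsp]
        simp only [List.headD, List.tail]
        by_cases h2 : c = '>'
        · subst h2
          constructor
          · rw [show stripOut ('>' :: r) = stripOut r from by simp [stripOut],
              show stripOut ('>' :: p) = stripOut p from by simp [stripOut]]
            exact ih1
          · rw [show stripIn ('>' :: r) = stripOut r from by simp [stripIn],
              show stripIn ('>' :: p) = stripOut p from by simp [stripIn]]
            exact ih1
        · constructor
          · rw [show stripOut (c :: r) = c :: stripOut r from by simp [stripOut, h1, h2],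
              show stripOut (c :: p) = c :: stripOut p from by simp [stripOut, h1, h2], ih1]
            simp
          · rw [show stripIn (c :: r) = stripIn r from by simp [stripIn, h2],
              show stripIn (c :: p) = stripIn p from by simp [stripIn, h2]]
            exact ih2

-- B's foldl over '<'-free parts
theorem foldl_altStep (parts : List (List Char)) : ∀ (cl : List Char),
    (∀ p ∈ parts, '<' ∉ p) →
    parts.foldl clearFormatAltStep cl = cl ++ (parts.map stripIn).flatten := by
  induction parts with
  | nil => simp
  | cons p t ih =>
    intro cl hp
    rw [List.foldl_cons, altStep_eq cl p (hp p (List.mem_cons_self ..)),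
      ih _ (fun q hq => hp q (List.mem_cons_of_mem _ hq))]
    simp

-- ===== VERDICT (by name: the statement is the Claim_ definition above) =====
theorem clearFormat_spec : Claim_equal_clearFormat := by
  intro content _
  unfold Spec_clearFormat clearFormat clearFormat_alt
  rw [(foldl_step_eq content.toList).1 []]
  rw [splitOn_eq_splitSpec]
  cases hs : splitSpec content.toList with
  | nil => exact absurd hs (splitSpec_ne_nil content.toList)
  | cons p t =>
    have hparts := splitSpec_no_lt content.toList
    rw [hs] at hparts
    simp only [List.headD, List.tail]
    rw [replace_eq_filtGt,
      foldl_altStep t (filtGt p) (fun q hq => hparts q (List.mem_cons_of_mem _ hq))]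
    have hss := (strip_split content.toList).1
    rw [hs] at hss
    simp only [List.headD, List.tail] at hss
    rw [List.nil_append, hss, stripOut_no_lt p (hparts p (List.mem_cons_self ..))]
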